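-- pv_equiv track=rewrite | github.com/avesed/webstock | qlib-service/app/utils/symbol_mapping.py | webstock_to_qlib
-- ===== SOURCE A (Python) =====
-- _WS_TO_QLIB_SUFFIX = {
--     ".SS": "SH",
--     ".SZ": "SZ",
--     ".HK": "HK",
-- }
--
-- _METAL_WS_TO_QLIB = {
--     "GC=F": "GCF",
--     "SI=F": "SIF",
--     "PL=F": "PLF",
--     "PA=F": "PAF",
-- }
--
-- def webstock_to_qlib(symbol: str, market: str = "") -> str:
--     """Convert WebStock symbol to Qlib format.
--
--     Examples:
--         600000.SS -> SH600000
--         000001.SZ -> SZ000001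
--         0700.HK   -> HK00700
--         AAPL      -> AAPL (unchanged for US)
--         GC=F      -> GCF
--     """
--     # Metal symbols
--     if symbol in _METAL_WS_TO_QLIB:
--         return _METAL_WS_TO_QLIB[symbol]
--
--     # Check for exchange suffix
--     for suffix, prefix in _WS_TO_QLIB_SUFFIX.items():
--         if symbol.upper().endswith(suffix):
--             code = symbol[: -len(suffix)]
--             return f"{prefix}{code}"
--
--     # US symbols pass through unchanged
--     return symbol
-- ===== SOURCE B (Python) =====
-- _WS_TO_QLIB_SUFFIX = {
--     ".SS": "SH",
--     ".SZ": "SZ",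
--     ".HK": "HK",
-- }
--
-- _METAL_WS_TO_QLIB = {
--     "GC=F": "GCF",
--     "SI=F": "SIF",
--     "PL=F": "PLF",
--     "PA=F": "PAF",
-- }
--
-- _EXT_TO_PREFIX = {"SS": "SH", "SZ": "SZ", "HK": "HK"}
--
--
-- def webstock_to_qlib(symbol: str, market: str = "") -> str:
--     """Convert WebStock symbol to Qlib format (parse once, then dict lookup)."""
--     if symbol in _METAL_WS_TO_QLIB:
--         return _METAL_WS_TO_QLIB[symbol]
--     base, dot, ext = symbol.rpartition(".")
--     if not dot:
--         return symbol
--     prefix = _EXT_TO_PREFIX.get(ext.upper())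
--     return prefix + base if prefix is not None else symbol
-- ===== Notes on version B (the rewrite author's own statement) =====
-- stated objective: simpler
-- what changed: A scans the suffix table testing symbol.upper().endswith(suffix) for each entry; B parses the symbol once with rpartition at the last dot and does a single dict lookup on the uppercased extension, with no suffix scan.
import Mathlib
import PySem

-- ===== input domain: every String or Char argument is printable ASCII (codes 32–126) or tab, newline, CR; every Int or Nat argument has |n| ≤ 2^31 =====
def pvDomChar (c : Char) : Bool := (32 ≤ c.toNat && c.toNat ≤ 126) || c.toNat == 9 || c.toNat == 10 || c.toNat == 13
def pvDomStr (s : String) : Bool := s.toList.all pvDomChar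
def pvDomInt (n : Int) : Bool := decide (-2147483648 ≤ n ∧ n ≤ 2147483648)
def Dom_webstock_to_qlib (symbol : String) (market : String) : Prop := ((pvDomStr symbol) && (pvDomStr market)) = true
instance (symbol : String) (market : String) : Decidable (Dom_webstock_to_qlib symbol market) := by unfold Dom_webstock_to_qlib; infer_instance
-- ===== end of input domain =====

-- B replaces A's linear suffix scan (an endswith test per table entry) by one split at the
-- last dot followed by a single dict lookup on the uppercased extension (objective: simpler).

-- ===== PORT A =====
-- module-level constant _METAL_WS_TO_QLIB
def pvMetal : PySem.Dict String String :=
  ⟨[("GC=F", "GCF"), ("SI=F", "SIF"), ("PL=F", "PLF"), ("PA=F", "PAF")]⟩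

-- module-level constant _WS_TO_QLIB_SUFFIX as its .items() list
def pvSuffixItems : List (String × String) := [(".SS", "SH"), (".SZ", "SZ"), (".HK", "HK")]

-- the 'for suffix, prefix in _WS_TO_QLIB_SUFFIX.items():' loop with its early return
def pvSuffixLoop (symbol : String) : List (String × String) → String
  | [] => symbol
  | (sfx, pfx) :: rest =>
      if PySem.Str.endswith (PySem.Str.upper symbol) sfx then
        pfx ++ PySem.Str.slice symbol none (some (-(PySem.Str.len sfx)))
      else pvSuffixLoop symbol rest

def webstock_to_qlib (symbol : String) (market : String) : String :=
  match PySem.Dict.get? pvMetal symbol with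
  | some v => v
  | none => pvSuffixLoop symbol pvSuffixItems

-- ===== PORT B =====
-- module-level constant _METAL_WS_TO_QLIB (B's copy)
def pvMetalB : PySem.Dict String String :=
  ⟨[("GC=F", "GCF"), ("SI=F", "SIF"), ("PL=F", "PLF"), ("PA=F", "PAF")]⟩

-- module-level constant _EXT_TO_PREFIX
def pvExtDict : PySem.Dict String String := ⟨[("SS", "SH"), ("SZ", "SZ"), ("HK", "HK")]⟩

-- hand port (exact): base, dot, ext = symbol.rpartition(dot) — splits at the LAST dot;
-- returns none exactly when the symbol has no dot (Python's empty middle field), else some (base, ext)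
def pvRPartDot (cs : List Char) : Option (List Char × List Char) :=
  if '.' ∈ cs then
    some ((((cs.reverse).dropWhile (fun ch => ch != '.')).tail).reverse,
          ((cs.reverse).takeWhile (fun ch => ch != '.')).reverse)
  else none

def webstock_to_qlib_alt (symbol : String) (market : String) : String :=
  match PySem.Dict.get? pvMetalB symbol with
  | some v => v
  | none =>
    match pvRPartDot symbol.toList with
    | none => symbol
    | some (base, ext) =>
      match PySem.Dict.get? pvExtDict (PySem.Str.upper (String.ofList ext)) with
      | some pfx => pfx ++ String.ofList base
      | none => symbol

-- ===== PRECONDITION & SPEC =====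
def Spec_webstock_to_qlib (symbol : String) (market : String) (out : String) : Prop := out = webstock_to_qlib_alt symbol market
instance (symbol : String) (market : String) (out : String) : Decidable (Spec_webstock_to_qlib symbol market out) := by unfold Spec_webstock_to_qlib; infer_instance

-- ===== CLAIM (what is proved, stated in full; the proofs are below) =====
def Claim_equal_webstock_to_qlib : Prop := ∀ (symbol : String) (market : String), Dom_webstock_to_qlib symbol market → Spec_webstock_to_qlib symbol market (webstock_to_qlib symbol market)

-- ===== LEMMAS AND PROOFS =====

theorem pv_upperChar_eq_dot {c : Char} : PySem.Chars.upperChar c = '.' ↔ c = '.' := by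
  unfold PySem.Chars.upperChar PySem.Chars.islower
  split_ifs with h
  · simp only [decide_eq_true_eq, Bool.and_eq_true] at h
    have hle : 97 ≤ c.toNat := h.1
    have hge : c.toNat ≤ 122 := h.2
    constructor
    · intro he
      exfalso
      have hv : (Char.ofNat (c.toNat - 32)).toNat = c.toNat - 32 := by
        rw [Char.toNat_ofNat, if_pos]
        left; omega
      have h46 : ('.' : Char).toNat = 46 := by decide
      rw [he, h46] at hv
      omega
    · intro he; subst he; simp at hle
  · simp

theorem pv_endswith_upper_iff (s p : String) :
    PySem.Str.endswith (PySem.Str.upper s) p = true ↔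
      p.toList.reverse <+: s.toList.reverse.map PySem.Chars.upperChar := by
  rw [show PySem.Str.endswith (PySem.Str.upper s) p
        = PySem.Chars.endswith (PySem.Str.upper s).toList p.toList from by
      simp [PySem.Str.endswith_eq]]
  rw [PySem.Chars.endswith_iff, PySem.Str.toList_upper, PySem.Chars.upper]
  rw [List.map_reverse, List.reverse_prefix]

theorem pv_beq_ofList2 (a b x y : Char) :
    (String.ofList [a, b] == String.ofList [x, y]) = (a == x && b == y) := by
  by_cases hx : a = x <;> by_cases hy : b = y <;>
    simp_all [String.ofList_inj, beq_eq_decide]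

theorem pv_extGet_eval (x y : Char) :
    PySem.Dict.get? pvExtDict (String.ofList [x, y]) =
      if x = 'S' ∧ y = 'S' then some "SH"
      else if x = 'S' ∧ y = 'Z' then some "SZ"
      else if x = 'H' ∧ y = 'K' then some "HK"
      else none := by
  have e1 : ("SS" : String) = String.ofList ['S', 'S'] := by decide
  have e2 : ("SZ" : String) = String.ofList ['S', 'Z'] := by decide
  have e3 : ("HK" : String) = String.ofList ['H', 'K'] := by decide
  simp only [pvExtDict, PySem.Dict.get?, List.find?, e1, e2, e3, pv_beq_ofList2]
  by_cases h1 : x = 'S' <;> by_cases h2 : y = 'S' <;> by_cases h3 : y = 'Z' <;>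
    by_cases h4 : x = 'H' <;> by_cases h5 : y = 'K' <;>
    simp_all [beq_eq_decide, eq_comm]

theorem pv_upper_ofList (l : List Char) :
    PySem.Str.upper (String.ofList l) = String.ofList (l.map PySem.Chars.upperChar) := by
  rw [← String.toList_inj]
  simp [PySem.Str.toList_upper, PySem.Chars.upper]

theorem pv_extGet_none (s : String) (h : s.toList.length ≠ 2) :
    PySem.Dict.get? pvExtDict s = none := by
  have h1 : (("SS" : String) == s) = false := by
    rw [beq_eq_false_iff_ne]; rintro rfl; exact h (by decide)
  have h2 : (("SZ" : String) == s) = false := by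
    rw [beq_eq_false_iff_ne]; rintro rfl; exact h (by decide)
  have h3 : (("HK" : String) == s) = false := by
    rw [beq_eq_false_iff_ne]; rintro rfl; exact h (by decide)
  simp [pvExtDict, PySem.Dict.get?, List.find?, h1, h2, h3]

theorem pv_cond_iff (symbol : String) (p : String) (u v : Char)
    (hp : p.toList.reverse = [u, v, '.']) (a b c : Char) (t : List Char)
    (hR : symbol.toList.reverse = a :: b :: c :: t) :
    PySem.Str.endswith (PySem.Str.upper symbol) p = true ↔
      (PySem.Chars.upperChar a = u ∧ PySem.Chars.upperChar b = v ∧ c = '.') := by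
  rw [pv_endswith_upper_iff, hp, hR]
  simp [List.cons_prefix_cons, ← pv_upperChar_eq_dot, eq_comm]

theorem pv_cond_false_short (symbol p : String) (hp : p.toList.reverse.length = 3)
    (hlen : symbol.toList.length < 3) :
    PySem.Str.endswith (PySem.Str.upper symbol) p = false := by
  rw [Bool.eq_false_iff]
  intro h
  rw [pv_endswith_upper_iff] at h
  have := h.length_le
  simp [hp] at this
  rw [String.length_toList] at hlen
  omega

theorem pv_rpart_eq (cs R : List Char) (h : cs.reverse = R) :
    pvRPartDot cs =
      if '.' ∈ R then
        some (((R.dropWhile (fun ch => ch != '.')).tail).reverse,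
              (R.takeWhile (fun ch => ch != '.')).reverse)
      else none := by
  simp [pvRPartDot, ← h, List.mem_reverse]

theorem pv_slice3_eq (symbol : String) (a b c : Char) (t : List Char)
    (hR : symbol.toList.reverse = a :: b :: c :: t) :
    PySem.Str.slice symbol none (some (-3)) = String.ofList t.reverse := by
  rw [← String.toList_inj, PySem.Str.toList_slice]
  simp only [PySem.Chars.slice_eq_listSlice]
  rw [PySem.List.slice_to_neg_ofNat _ 3 (by omega)]
  have hcs : symbol.toList = t.reverse ++ [c, b, a] := by
    rw [← List.reverse_reverse (symbol.toList), hR]; simp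
  rw [hcs]
  have hlen : (t.reverse ++ [c, b, a]).length - 3 = t.reverse.length := by
    simp
  rw [hlen, List.take_left' rfl, String.toList_ofList]

theorem pv_ext_miss (ext : List Char) (h : ext.length ≠ 2) :
    PySem.Dict.get? pvExtDict (PySem.Str.upper (String.ofList ext)) = none := by
  apply pv_extGet_none
  rw [pv_upper_ofList, String.toList_ofList]
  simpa using h

theorem pv_main (symbol market : String) :
    webstock_to_qlib symbol market = webstock_to_qlib_alt symbol market := by
  unfold webstock_to_qlib webstock_to_qlib_alt
  rw [show pvMetalB = pvMetal from rfl]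
  cases hm : PySem.Dict.get? pvMetal symbol with
  | some v => rfl
  | none =>
  simp only [pvSuffixItems, pvSuffixLoop]
  rcases hR : symbol.toList.reverse with _ | ⟨a, _ | ⟨b, _ | ⟨c, t⟩⟩⟩
  -- R = []
  · have hl : symbol.toList.length < 3 := by
      rw [← List.length_reverse, hR]; simp
    rw [pv_cond_false_short symbol ".SS" (by decide) hl,
        pv_cond_false_short symbol ".SZ" (by decide) hl,
        pv_cond_false_short symbol ".HK" (by decide) hl,
        pv_rpart_eq symbol.toList _ hR]
    simp
  -- R = [a]
  · have hl : symbol.toList.length < 3 := by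
      rw [← List.length_reverse, hR]; simp
    rw [pv_cond_false_short symbol ".SS" (by decide) hl,
        pv_cond_false_short symbol ".SZ" (by decide) hl,
        pv_cond_false_short symbol ".HK" (by decide) hl,
        pv_rpart_eq symbol.toList _ hR]
    simp only [Bool.false_eq_true, if_false]
    by_cases ha : a = '.'
    · subst ha
      have hmiss := pv_ext_miss (([] : List Char)) (by simp)
      simp [hmiss]
    · simp [eq_comm, ha]
  -- R = [a, b]
  · have hl : symbol.toList.length < 3 := by
      rw [← List.length_reverse, hR]; simp
    rw [pv_cond_false_short symbol ".SS" (by decide) hl,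
        pv_cond_false_short symbol ".SZ" (by decide) hl,
        pv_cond_false_short symbol ".HK" (by decide) hl,
        pv_rpart_eq symbol.toList _ hR]
    simp only [Bool.false_eq_true, if_false]
    by_cases ha : a = '.'
    · subst ha
      have hmiss := pv_ext_miss (([] : List Char)) (by simp)
      simp [hmiss]
    · by_cases hb : b = '.'
      · subst hb
        have hmiss := pv_ext_miss [a] (by simp)
        simp [ha, hmiss]
      · simp [eq_comm, ha, hb]
  -- R = a :: b :: c :: t
  · have i1 := pv_cond_iff symbol ".SS" 'S' 'S' (by decide) a b c t hR
    have i2 := pv_cond_iff symbol ".SZ" 'Z' 'S' (by decide) a b c t hR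
    have i3 := pv_cond_iff symbol ".HK" 'K' 'H' (by decide) a b c t hR
    rw [pv_rpart_eq symbol.toList _ hR]
    by_cases hc : c = '.'
    · subst hc
      by_cases ha : a = '.'
      · subst ha
        rw [if_neg (fun h => absurd (i1.mp h).1 (by decide)),
            if_neg (fun h => absurd (i2.mp h).1 (by decide)),
            if_neg (fun h => absurd (i3.mp h).1 (by decide))]
        have hmiss := pv_ext_miss (([] : List Char)) (by simp)
        simp [hmiss]
      · by_cases hb : b = '.'
        · subst hb
          rw [if_neg (fun h => absurd (i1.mp h).2.1 (by decide)),
              if_neg (fun h => absurd (i2.mp h).2.1 (by decide)),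
              if_neg (fun h => absurd (i3.mp h).2.1 (by decide))]
          have hmiss := pv_ext_miss [a] (by simp)
          simp [ha, hmiss]
        · -- real split: ext = [b, a], base = t.reverse
          have htake : (a :: b :: '.' :: t).takeWhile (fun ch => ch != '.') = [a, b] := by
            simp [List.takeWhile_cons, ha, hb]
          have hdrop : (a :: b :: '.' :: t).dropWhile (fun ch => ch != '.') = '.' :: t := by
            simp [List.dropWhile_cons, ha, hb]
          have hup : PySem.Str.upper (String.ofList [b, a])
              = String.ofList [PySem.Chars.upperChar b, PySem.Chars.upperChar a] := by
            rw [pv_upper_ofList]; rfl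
          have hslice : PySem.Str.slice symbol none (some (-3)) = String.ofList t.reverse :=
            pv_slice3_eq symbol a b '.' t hR
          have hlen3 : ∀ p : String, p = ".SS" ∨ p = ".SZ" ∨ p = ".HK" →
              -(PySem.Str.len p) = (-3 : Int) := by
            rintro p (rfl | rfl | rfl) <;> decide
          by_cases j1 : PySem.Chars.upperChar b = 'S' ∧ PySem.Chars.upperChar a = 'S'
          · rw [if_pos (i1.mpr ⟨j1.2, j1.1, rfl⟩)]
            rw [hlen3 ".SS" (Or.inl rfl), hslice]
            simp [htake, hdrop, hup, pv_extGet_eval, j1.1, j1.2, pvExtDict, PySem.Dict.get?, List.find?]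
          · by_cases j2 : PySem.Chars.upperChar b = 'S' ∧ PySem.Chars.upperChar a = 'Z'
            · rw [if_neg (fun h => j1 ⟨(i1.mp h).2.1, (i1.mp h).1⟩),
                  if_pos (i2.mpr ⟨j2.2, j2.1, rfl⟩)]
              rw [hlen3 ".SZ" (Or.inr (Or.inl rfl)), hslice]
              have : ¬ (PySem.Chars.upperChar b = 'S' ∧ PySem.Chars.upperChar a = 'S') := j1
              simp [htake, hdrop, hup, pv_extGet_eval, j2.1, j2.2, this, pvExtDict, PySem.Dict.get?, List.find?]
            · by_cases j3 : PySem.Chars.upperChar b = 'H' ∧ PySem.Chars.upperChar a = 'K'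
              · rw [if_neg (fun h => j1 ⟨(i1.mp h).2.1, (i1.mp h).1⟩),
                    if_neg (fun h => j2 ⟨(i2.mp h).2.1, (i2.mp h).1⟩),
                    if_pos (i3.mpr ⟨j3.2, j3.1, rfl⟩)]
                rw [hlen3 ".HK" (Or.inr (Or.inr rfl)), hslice]
                simp [htake, hdrop, hup, pv_extGet_eval, j1, j2, j3.1, j3.2, pvExtDict, PySem.Dict.get?, List.find?]
              · rw [if_neg (fun h => j1 ⟨(i1.mp h).2.1, (i1.mp h).1⟩),
                    if_neg (fun h => j2 ⟨(i2.mp h).2.1, (i2.mp h).1⟩),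
                    if_neg (fun h => j3 ⟨(i3.mp h).2.1, (i3.mp h).1⟩)]
                simp [htake, hdrop, hup, pv_extGet_eval, j1, j2, j3]
    · -- c ≠ '.': A never matches
      rw [if_neg (fun h => hc (i1.mp h).2.2),
          if_neg (fun h => hc (i2.mp h).2.2),
          if_neg (fun h => hc (i3.mp h).2.2)]
      by_cases hdot : ('.' : Char) ∈ (a :: b :: c :: t)
      · by_cases ha : a = '.'
        · subst ha
          have hmiss := pv_ext_miss (([] : List Char)) (by simp)
          simp [hdot, hmiss]
        · by_cases hb : b = '.'
          · subst hb
            have hmiss := pv_ext_miss [a] (by simp)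
            simp [hdot, ha, hmiss]
          · have htake : (a :: b :: c :: t).takeWhile (fun ch => ch != '.')
                = a :: b :: c :: t.takeWhile (fun ch => ch != '.') := by
              simp [List.takeWhile_cons, ha, hb, hc]
            rw [if_pos hdot, htake]
            generalize hG : (a :: b :: c :: List.takeWhile (fun ch => ch != '.') t).reverse = L
            have hmiss := pv_ext_miss L
              (by rw [← hG]; simp only [List.length_reverse, List.length_cons]; omega)
            simp [hmiss]
      · simp [hdot]

-- ===== VERDICT (by name: the statement is the Claim_ definition above) =====
theorem webstock_to_qlib_spec : Claim_equal_webstock_to_qlib := by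
  intro symbol market _
  exact pv_main symbol market
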